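-- pv_equiv track=rewrite | github.com/josephvalencia/pk-sat | utils.py | find_bps
-- ===== SOURCE A (Python) =====
-- def find_bps(struct):
--
--     bp_list = []
--     left_paren_locs = []
--     left_brack_locs = []
--
--     # find left members
--     for i in range(len(struct)):
--         c = struct[i]
--         if c == '(':
--             left_paren_locs.append(i)
--         elif c == '[':
--             left_brack_locs.append(i)
--     # find right paren matches
--     for p in left_paren_locs:
--         count = 1
--         for j in range(p+1,len(struct)):
--             c = struct[j]
--             if c == '(':
--                 count +=1
--             elif c == ')':
--                 count -=1
--             if count == 0:
--                 # plus one for 1-base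
--                 bp_list.append((p+1,j+1))
--                 break
--     # find right brack matches
--     for p in left_brack_locs:
--         count = 1
--         for j in range(p+1,len(struct)):
--             c = struct[j]
--             if c == '[':
--                 count +=1
--             elif c == ']':
--                 count -=1
--             if count == 0:
--                 # plus one for 1-base
--                 bp_list.append((p+1,j+1))
--                 break
--     return bp_list
-- ===== SOURCE B (Python) =====
-- def find_bps(struct):
--     paren_stack = []
--     brack_stack = []
--     parens = []
--     bracks = []
--     for i, c in enumerate(struct):
--         if c == '(':
--             paren_stack.append(i)
--         elif c == ')':
--             if paren_stack:
--                 parens.append((paren_stack.pop() + 1, i + 1))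
--         elif c == '[':
--             brack_stack.append(i)
--         elif c == ']':
--             if brack_stack:
--                 bracks.append((brack_stack.pop() + 1, i + 1))
--     parens.sort(key=lambda t: t[0])
--     bracks.sort(key=lambda t: t[0])
--     return parens + bracks
-- ===== Notes on version B (the rewrite author's own statement) =====
-- stated objective: alternative
-- what changed: Replaces A's per-open-bracket counter rescan of the suffix with a single stack-based pass that collects each pair at its matching close, then sorts each group by opening index to restore A's output order.
import Mathlib
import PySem

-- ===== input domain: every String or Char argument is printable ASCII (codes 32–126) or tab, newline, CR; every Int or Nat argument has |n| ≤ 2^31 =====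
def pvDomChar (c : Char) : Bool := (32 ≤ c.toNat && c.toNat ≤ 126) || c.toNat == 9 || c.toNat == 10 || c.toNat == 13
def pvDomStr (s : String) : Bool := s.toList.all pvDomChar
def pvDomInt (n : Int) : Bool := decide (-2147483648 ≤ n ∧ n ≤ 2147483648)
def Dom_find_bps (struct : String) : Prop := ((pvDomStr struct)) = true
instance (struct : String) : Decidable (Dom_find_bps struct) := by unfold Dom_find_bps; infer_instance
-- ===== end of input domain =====

-- B replaces A's per-open-bracket counter rescan of the suffix by one stack-based pass,
-- sorting each pair group by opening index to restore A's order (objective: alternative).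

-- ===== PORT A =====
-- the inner 'for j in range(p+1, len(struct)): … count … if count == 0: break' loop of A
def scanAGo (cs : List Char) (oc cc : Char) : Int → List Int → Option Int
  | _, [] => none
  | count, j :: rest =>
    let c := PySem.List.pyGetD cs j ' '
    let count' := if c = oc then count + 1 else if c = cc then count - 1 else count
    if count' = 0 then some j else scanAGo cs oc cc count' rest

def find_bps (struct : String) : List (Int × Int) :=
  let cs := struct.toList
  let n := PySem.List.len cs
  let locs := (PySem.List.pyRange 0 n 1).foldl
    (fun (acc : List Int × List Int) i =>
      let c := PySem.List.pyGetD cs i ' '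
      if c = '(' then (acc.1 ++ [i], acc.2)
      else if c = '[' then (acc.1, acc.2 ++ [i])
      else acc) ([], [])
  let bp1 := locs.1.foldl (fun out p =>
    match scanAGo cs '(' ')' 1 (PySem.List.pyRange (p + 1) n 1) with
    | some j => out ++ [(p + 1, j + 1)]
    | none => out) []
  locs.2.foldl (fun out p =>
    match scanAGo cs '[' ']' 1 (PySem.List.pyRange (p + 1) n 1) with
    | some j => out ++ [(p + 1, j + 1)]
    | none => out) bp1

-- ===== PORT B =====
-- the single pass of B: two stacks of open positions, two pair accumulators
def stackGo : List (Int × Char) → List Int → List Int → List (Int × Int) → List (Int × Int) → List (Int × Int) × List (Int × Int)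
  | [], _, _, ps, bs => (ps, bs)
  | (i, c) :: rest, pst, bst, ps, bs =>
    if c = '(' then stackGo rest (i :: pst) bst ps bs
    else if c = ')' then
      match pst with
      | [] => stackGo rest pst bst ps bs
      | p :: pst' => stackGo rest pst' bst (ps ++ [(p + 1, i + 1)]) bs
    else if c = '[' then stackGo rest pst (i :: bst) ps bs
    else if c = ']' then
      match bst with
      | [] => stackGo rest pst bst ps bs
      | b :: bst' => stackGo rest pst bst' ps (bs ++ [(b + 1, i + 1)])
    else stackGo rest pst bst ps bs

def find_bps_alt (struct : String) : List (Int × Int) :=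
  let r := stackGo (PySem.List.enumerate struct.toList 0) [] [] [] []
  PySem.List.sorted r.1 (fun t => t.1) false ++ PySem.List.sorted r.2 (fun t => t.1) false

-- ===== PRECONDITION & SPEC =====
def Spec_find_bps (struct : String) (out : List (Int × Int)) : Prop := out = find_bps_alt struct
instance (struct : String) (out : List (Int × Int)) : Decidable (Spec_find_bps struct out) := by unfold Spec_find_bps; infer_instance

-- ===== CLAIM (what is proved, stated in full; the proofs are below) =====
def Claim_equal_find_bps : Prop := ∀ (struct : String), Dom_find_bps struct → Spec_find_bps struct (find_bps struct)

-- ===== LEMMAS AND PROOFS =====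

-- one-bracket-pair reference machine: B's stack pass restricted to one pair of chars
def run1 (oc cc : Char) : List (Int × Char) → List Int → List (Int × Int)
  | [], _ => []
  | (i, c) :: rest, st =>
    if c = oc then run1 oc cc rest (i :: st)
    else if c = cc then
      match st with
      | [] => run1 oc cc rest st
      | p :: st' => (p + 1, i + 1) :: run1 oc cc rest st'
    else run1 oc cc rest st

-- A's counter scan, structurally over (index, char) pairs
def scan1 (oc cc : Char) : List (Int × Char) → Int → Option Int
  | [], _ => none
  | (i, c) :: rest, count =>
    let count' := if c = oc then count + 1 else if c = cc then count - 1 else count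
    if count' = 0 then some i else scan1 oc cc rest count'

def optPair (p : Int) : Option Int → List (Int × Int)
  | some j => [(p + 1, j + 1)]
  | none => []

-- A's whole per-open-location computation, structurally
def inner1 (oc cc : Char) : List (Int × Char) → List (Int × Int)
  | [] => []
  | (i, c) :: rest =>
    if c = oc then optPair i (scan1 oc cc rest 1) ++ inner1 oc cc rest
    else inner1 oc cc rest

-- pairs the stacked opens would still produce, k = counter value of the top element
def stMatched (oc cc : Char) (L : List (Int × Char)) : List Int → Int → List (Int × Int)
  | [], _ => []
  | p :: st, k =>
    match scan1 oc cc L k with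
    | some j => (p + 1, j + 1) :: stMatched oc cc L st (k + 1)
    | none => stMatched oc cc L st (k + 1)

theorem stMatched_nil (oc cc : Char) (st : List Int) (k : Int) :
    stMatched oc cc [] st k = [] := by
  induction st generalizing k with
  | nil => rfl
  | cons p st ih => simp [stMatched, scan1, ih]

theorem stMatched_cons_open (oc cc : Char) (i : Int) (rest : List (Int × Char))
    (st : List Int) (k : Int) (hk : 1 ≤ k) :
    stMatched oc cc ((i, oc) :: rest) st k = stMatched oc cc rest st (k + 1) := by
  induction st generalizing k with
  | nil => rfl
  | cons p st ih =>
    simp only [stMatched, scan1, if_true, if_neg (show ¬ (k + 1 = 0) by omega),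
      ih (k + 1) (by omega)]

theorem stMatched_cons_close (oc cc : Char) (hne : oc ≠ cc) (i : Int)
    (rest : List (Int × Char)) (st : List Int) (k : Int) (hk : 2 ≤ k) :
    stMatched oc cc ((i, cc) :: rest) st k = stMatched oc cc rest st (k - 1) := by
  induction st generalizing k with
  | nil => rfl
  | cons p st ih =>
    simp only [stMatched, scan1, if_neg (Ne.symm hne), if_true,
      if_neg (show ¬ (k - 1 = 0) by omega), ih (k + 1) (by omega)]
    have e : k + 1 - 1 = k - 1 + 1 := by ring
    rw [e]

theorem stMatched_cons_other (oc cc : Char) (i : Int) (c : Char) (ho : c ≠ oc) (hc : c ≠ cc)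
    (rest : List (Int × Char)) (st : List Int) (k : Int) (hk : 1 ≤ k) :
    stMatched oc cc ((i, c) :: rest) st k = stMatched oc cc rest st k := by
  induction st generalizing k with
  | nil => rfl
  | cons p st ih =>
    simp only [stMatched, scan1, if_neg ho, if_neg hc,
      if_neg (show ¬ (k = 0) by omega), ih (k + 1) (by omega)]

-- the core permutation: stack machine output ~ per-open scans
theorem run1_perm (oc cc : Char) (hne : oc ≠ cc) (L : List (Int × Char)) (st : List Int) :
    (run1 oc cc L st).Perm (stMatched oc cc L st 1 ++ inner1 oc cc L) := by
  induction L generalizing st with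
  | nil => simp [run1, inner1, stMatched_nil]
  | cons x rest ih =>
    obtain ⟨i, c⟩ := x
    by_cases h1 : c = oc
    · rw [h1]
      rw [stMatched_cons_open _ _ _ _ _ 1 (by omega)]
      simp only [run1, inner1]
      cases hscan : scan1 oc cc rest 1 with
      | some j =>
        have h := ih (i :: st)
        rw [stMatched, hscan] at h
        refine h.trans ?_
        simpa [optPair] using (List.perm_middle).symm
      | none =>
        have h := ih (i :: st)
        rw [stMatched, hscan] at h
        simpa [optPair] using h
    · by_cases h2 : c = cc
      · rw [h2]
        simp only [run1, inner1, if_neg (h2 ▸ h1)]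
        cases st with
        | nil =>
          have h := ih ([] : List Int)
          simpa [stMatched, stMatched_nil] using h
        | cons p st' =>
          rw [stMatched, show scan1 oc cc ((i, cc) :: rest) 1 = some i by
            simp [scan1, fun hh => (h2 ▸ h1) hh]]
          rw [stMatched_cons_close _ _ hne _ _ _ (1+1) (by omega)]
          have e : (1:Int) + 1 - 1 = 1 := by norm_num
          rw [e]
          have h := ih st'
          simpa using h.cons ((p + 1, i + 1))
      · simp only [run1, inner1, if_neg h1, if_neg h2]
        rw [stMatched_cons_other _ _ _ _ h1 h2 _ _ 1 (by omega)]
        exact ih st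

theorem mem_inner1 (oc cc : Char) (L : List (Int × Char)) :
    ∀ x ∈ inner1 oc cc L, ∃ p ∈ L, x.1 = p.1 + 1 := by
  induction L with
  | nil => simp [inner1]
  | cons y rest ih =>
    obtain ⟨i, c⟩ := y
    intro x hx
    by_cases h : c = oc
    · rw [inner1, if_pos h] at hx
      rcases List.mem_append.1 hx with hl | hr
      · cases hs : scan1 oc cc rest 1 with
        | some j =>
          rw [hs] at hl
          simp only [optPair, List.mem_singleton] at hl
          exact ⟨(i, c), List.mem_cons_self, by simp [hl]⟩
        | none => rw [hs] at hl; simp [optPair] at hl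
      · obtain ⟨p, hp, he⟩ := ih x hr
        exact ⟨p, List.mem_cons_of_mem _ hp, he⟩
    · rw [inner1, if_neg h] at hx
      obtain ⟨p, hp, he⟩ := ih x hx
      exact ⟨p, List.mem_cons_of_mem _ hp, he⟩

theorem pairwise_inner1 (oc cc : Char) (L : List (Int × Char))
    (h : L.Pairwise (fun a b => a.1 < b.1)) :
    (inner1 oc cc L).Pairwise (fun a b => a.1 < b.1) := by
  induction h with
  | nil => simp [inner1]
  | @cons a l hhead htail ih =>
    obtain ⟨i, c⟩ := a
    by_cases h : c = oc
    · rw [inner1, if_pos h]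
      cases hs : scan1 oc cc l 1 with
      | some j =>
        simp only [optPair, List.singleton_append]
        refine List.Pairwise.cons ?_ ih
        intro y hy
        obtain ⟨p, hp, he⟩ := mem_inner1 oc cc l y hy
        have := hhead p hp
        simp only [he]
        omega
      | none => simpa [optPair] using ih
    · rw [inner1, if_neg h]; exact ih

theorem sorted_run1 (oc cc : Char) (hne : oc ≠ cc) (cs : List Char) :
    PySem.List.sorted (run1 oc cc (PySem.List.enumerate cs 0) []) (fun t => t.1) false
      = inner1 oc cc (PySem.List.enumerate cs 0) := by
  have hperm : (run1 oc cc (PySem.List.enumerate cs 0) []).Perm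
      (inner1 oc cc (PySem.List.enumerate cs 0)) := by
    simpa [stMatched] using run1_perm oc cc hne (PySem.List.enumerate cs 0) []
  exact PySem.List.sorted_eq_of_perm_of_pairwise_lt _ _ _ hperm.symm
    (pairwise_inner1 oc cc _ (PySem.List.pairwise_lt_enumerate cs 0))

-- B's combined pass is the two one-pair machines
theorem stackGo_eq (L : List (Int × Char)) (pst bst : List Int)
    (ps bs : List (Int × Int)) :
    stackGo L pst bst ps bs = (ps ++ run1 '(' ')' L pst, bs ++ run1 '[' ']' L bst) := by
  induction L generalizing pst bst ps bs with
  | nil => simp [stackGo, run1]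
  | cons y rest ih =>
    obtain ⟨i, c⟩ := y
    by_cases h1 : c = '('
    · simp [stackGo, run1, h1, ih]
    · by_cases h2 : c = ')'
      · cases pst with
        | nil => simp [stackGo, run1, h2, ih]
        | cons p pst' => simp [stackGo, run1, h2, ih]
      · by_cases h3 : c = '['
        · simp [stackGo, run1, h3, ih]
        · by_cases h4 : c = ']'
          · cases bst with
            | nil => simp [stackGo, run1, h4, ih]
            | cons b bst' => simp [stackGo, run1, h4, ih]
          · simp [stackGo, run1, h1, h2, h3, h4, ih]

-- scanAGo over an index list = scan1 over those indices paired with their chars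
theorem scanAGo_eq_scan1 (cs : List Char) (oc cc : Char) (idxs : List Int) (count : Int) :
    scanAGo cs oc cc count idxs
      = scan1 oc cc (idxs.map (fun j => (j, PySem.List.pyGetD cs j ' '))) count := by
  induction idxs generalizing count with
  | nil => rfl
  | cons j rest ih => simp only [scanAGo, scan1, List.map]; rw [ih]

theorem getD_append_length (pre : List Char) (c : Char) (cs : List Char) :
    PySem.List.pyGetD (pre ++ c :: cs) (pre.length : Int) ' ' = c := by
  rw [PySem.List.pyGetD_natCast]
  simp [List.getD_eq_getElem?_getD]

-- indices paired with pyGetD chars = enumerate, with a prefix offset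
theorem mapPyRange_eq_enumerate (pre cs : List Char) :
    (PySem.List.pyRange (pre.length : Int) ((pre.length : Int) + (cs.length : Int)) 1).map
        (fun j => (j, PySem.List.pyGetD (pre ++ cs) j ' '))
      = PySem.List.enumerate cs (pre.length : Int) := by
  induction cs generalizing pre with
  | nil =>
    rw [PySem.List.pyRange_one_eq_nil (by simp)]
    simp
  | cons c cs' ih =>
    have e1 : ((pre.length : Int)) + 1 = (((pre ++ [c]).length : Nat) : Int) := by
      simp [List.length_append]
    have e2 : ((pre.length : Int)) + (((c :: cs').length : Nat) : Int)
        = (((pre ++ [c]).length : Nat) : Int) + ((cs'.length : Nat) : Int) := by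
      simp [List.length_append, List.length_cons]; ring
    have e3 : pre ++ c :: cs' = (pre ++ [c]) ++ cs' := by simp
    rw [PySem.List.pyRange_one_cons (by omega), List.map_cons,
      getD_append_length, PySem.List.enumerate_cons, e2, e1, e3, ih (pre ++ [c])]

-- A's left-location fold is a pair of filters
theorem locs_fold_eq (cs : List Char) (idxs : List Int) (a b : List Int) :
    idxs.foldl (fun (acc : List Int × List Int) i =>
      let c := PySem.List.pyGetD cs i ' '
      if c = '(' then (acc.1 ++ [i], acc.2)
      else if c = '[' then (acc.1, acc.2 ++ [i])
      else acc) (a, b)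
    = (a ++ idxs.filter (fun i => PySem.List.pyGetD cs i ' ' = '('),
       b ++ idxs.filter (fun i => PySem.List.pyGetD cs i ' ' = '[')) := by
  induction idxs generalizing a b with
  | nil => simp
  | cons i t ih =>
    by_cases h1 : PySem.List.pyGetD cs i ' ' = '('
    · simp [h1, ih]
    · by_cases h2 : PySem.List.pyGetD cs i ' ' = '['
      · simp [h2, ih]
      · simp [h1, h2, ih]

-- A's scan loop over the filtered opens = inner1, with a prefix offset
theorem flatMap_scan_eq_inner1 (oc cc : Char) (pre cs : List Char) :
    (((PySem.List.pyRange (pre.length : Int) ((pre.length : Int) + (cs.length : Int)) 1).filter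
        (fun i => PySem.List.pyGetD (pre ++ cs) i ' ' = oc)).flatMap
      (fun p => optPair p (scanAGo (pre ++ cs) oc cc 1
        (PySem.List.pyRange (p + 1) ((pre.length : Int) + (cs.length : Int)) 1))))
      = inner1 oc cc (PySem.List.enumerate cs (pre.length : Int)) := by
  induction cs generalizing pre with
  | nil =>
    rw [PySem.List.pyRange_one_eq_nil (by simp)]
    simp [inner1]
  | cons c cs' ih =>
    have e1 : ((pre.length : Int)) + 1 = (((pre ++ [c]).length : Nat) : Int) := by
      simp [List.length_append]
    have e2 : ((pre.length : Int)) + (((c :: cs').length : Nat) : Int)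
        = (((pre ++ [c]).length : Nat) : Int) + ((cs'.length : Nat) : Int) := by
      simp [List.length_append, List.length_cons]; ring
    have e3 : pre ++ c :: cs' = (pre ++ [c]) ++ cs' := by simp
    have hd := getD_append_length pre c cs'
    rw [PySem.List.pyRange_one_cons (by omega), List.filter_cons,
      PySem.List.enumerate_cons]
    by_cases h : c = oc
    · rw [if_pos (by rw [hd, h]; simp), List.flatMap_cons, inner1, if_pos h]
      congr 1
      · rw [scanAGo_eq_scan1, e2, e1, e3, mapPyRange_eq_enumerate (pre ++ [c]) cs', ← e1]
      · rw [e2, e1, e3, ih (pre ++ [c]), ← e1]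
    · rw [if_neg (by rw [hd]; simp [h]), inner1, if_neg h, e2, e1, e3, ih (pre ++ [c]), ← e1]

-- ===== VERDICT (by name: the statement is the Claim_ definition above) =====
theorem find_bps_spec : Claim_equal_find_bps := by
  intro struct _
  show find_bps struct = find_bps_alt struct
  simp only [find_bps, find_bps_alt]
  rw [stackGo_eq, locs_fold_eq]
  simp only [PySem.List.len_eq, List.nil_append]
  rw [sorted_run1 '(' ')' (by decide), sorted_run1 '[' ']' (by decide)]
  have hfun : ∀ (oc cc : Char) (out : List (Int × Int)) (p : Int),
      (match scanAGo struct.toList oc cc 1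
          (PySem.List.pyRange (p + 1) ((struct.toList.length : Nat) : Int) 1) with
        | some j => out ++ [(p + 1, j + 1)]
        | none => out)
      = out ++ optPair p (scanAGo struct.toList oc cc 1
          (PySem.List.pyRange (p + 1) ((struct.toList.length : Nat) : Int) 1)) := by
    intro oc cc out p
    cases scanAGo struct.toList oc cc 1
      (PySem.List.pyRange (p + 1) ((struct.toList.length : Nat) : Int) 1) <;> simp [optPair]
  have key : ∀ (oc cc : Char) (init : List (Int × Int)) (l : List Int),
      l.foldl (fun out p =>
        match scanAGo struct.toList oc cc 1
            (PySem.List.pyRange (p + 1) ((struct.toList.length : Nat) : Int) 1) with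
          | some j => out ++ [(p + 1, j + 1)]
          | none => out) init
      = init ++ l.flatMap (fun p => optPair p (scanAGo struct.toList oc cc 1
          (PySem.List.pyRange (p + 1) ((struct.toList.length : Nat) : Int) 1))) := by
    intro oc cc init l
    rw [PySem.List.foldl_congr_mem l _
      (fun out p => out ++ optPair p (scanAGo struct.toList oc cc 1
        (PySem.List.pyRange (p + 1) ((struct.toList.length : Nat) : Int) 1))) init
      (fun acc x _ => hfun oc cc acc x)]
    exact PySem.List.foldl_append_eq_flatMap _ _ _
  rw [key, key]
  have hp := flatMap_scan_eq_inner1 '(' ')' [] struct.toList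
  have hb := flatMap_scan_eq_inner1 '[' ']' [] struct.toList
  simp only [List.length_nil, Nat.cast_zero, List.nil_append, zero_add] at hp hb
  simp only [List.nil_append]
  exact congrArg₂ (· ++ ·) hp hb
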